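-- pv_equiv track=rewrite | github.com/spollard1810/cleanSimpleNetmiko | crawler.py | detect_device_type_from_platform
-- ===== SOURCE A (Python) =====
-- PLATFORM_DEVICE_DETECTION_MAP = {
--     "ios xe": "cisco_ios",
--     "ios-xe": "cisco_ios",
--     "iosxe": "cisco_ios",
--     "cisco ios": "cisco_ios",
--     "ios": "cisco_ios",
--     "catalyst": "cisco_ios",
--     "ws-c": "cisco_ios",
--     "c9": "cisco_ios",
--     "ios xr": "cisco_xr",
--     "asr9k": "cisco_xr",
--     "nx-os": "cisco_nxos",
--     "nexus": "cisco_nxos",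
--     "n9k": "cisco_nxos",
--     "n7k": "cisco_nxos",
--     "n5k": "cisco_nxos",
--     "n3k": "cisco_nxos",
--     "adaptive security appliance": "cisco_asa",
--     "asa": "cisco_asa",
--     "wireless lan controller": "cisco_wlc",
--     "wireless": "cisco_wlc",
--     "air-ct": "cisco_wlc",
--     "wlc": "cisco_wlc",
-- }
--
-- def detect_device_type_from_platform(platform):
--     """Infer Netmiko device_type using CDP platform text."""
--     blob = f" {platform or ''} ".lower()
--     for marker, device_type in sorted(
--         PLATFORM_DEVICE_DETECTION_MAP.items(),
--         key=lambda item: len(item[0]),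
--         reverse=True,
--     ):
--         if marker in blob:
--             return device_type
--     # Default to cisco_ios (includes IOS/IOS-XE families).
--     return "cisco_ios"
-- ===== SOURCE B (Python) =====
-- PLATFORM_DEVICE_DETECTION_MAP = {
--     "ios xe": "cisco_ios",
--     "ios-xe": "cisco_ios",
--     "iosxe": "cisco_ios",
--     "cisco ios": "cisco_ios",
--     "ios": "cisco_ios",
--     "catalyst": "cisco_ios",
--     "ws-c": "cisco_ios",
--     "c9": "cisco_ios",
--     "ios xr": "cisco_xr",
--     "asr9k": "cisco_xr",
--     "nx-os": "cisco_nxos",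
--     "nexus": "cisco_nxos",
--     "n9k": "cisco_nxos",
--     "n7k": "cisco_nxos",
--     "n5k": "cisco_nxos",
--     "n3k": "cisco_nxos",
--     "adaptive security appliance": "cisco_asa",
--     "asa": "cisco_asa",
--     "wireless lan controller": "cisco_wlc",
--     "wireless": "cisco_wlc",
--     "air-ct": "cisco_wlc",
--     "wlc": "cisco_wlc",
-- }
--
--
-- def detect_device_type_from_platform(platform):
--     """Infer Netmiko device_type using CDP platform text."""
--     blob = f" {platform or ''} ".lower()
--     best_type = None
--     best_len = -1
--     for marker, device_type in PLATFORM_DEVICE_DETECTION_MAP.items():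
--         if marker in blob and len(marker) > best_len:
--             best_type = device_type
--             best_len = len(marker)
--     return best_type if best_type is not None else "cisco_ios"
-- ===== Notes on version B (the rewrite author's own statement) =====
-- stated objective: simpler
-- what changed: Replaces the per-call length-descending sort plus first-match scan with a single best-tracking pass over the map in insertion order (strict > keeps the earlier marker on length ties, matching the stable sort).
import Mathlib
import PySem

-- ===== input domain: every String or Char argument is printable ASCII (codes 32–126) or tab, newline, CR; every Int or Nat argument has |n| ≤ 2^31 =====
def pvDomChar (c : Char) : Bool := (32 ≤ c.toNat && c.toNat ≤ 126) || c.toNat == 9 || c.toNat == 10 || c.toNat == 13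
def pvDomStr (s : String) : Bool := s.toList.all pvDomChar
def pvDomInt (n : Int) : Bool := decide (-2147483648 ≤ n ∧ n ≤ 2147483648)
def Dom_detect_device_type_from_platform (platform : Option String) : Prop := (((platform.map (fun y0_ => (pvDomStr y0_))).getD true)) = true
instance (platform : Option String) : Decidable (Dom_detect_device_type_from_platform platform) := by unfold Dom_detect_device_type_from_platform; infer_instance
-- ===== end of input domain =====

-- B replaces A's per-call length-descending sort + first-match scan by a single
-- best-tracking pass over the map in insertion order (simpler; return value proved equal).

-- the module-level PLATFORM_DEVICE_DETECTION_MAP, in insertion order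
def pvMap : List (String × String) :=
  [("ios xe", "cisco_ios"), ("ios-xe", "cisco_ios"), ("iosxe", "cisco_ios"),
   ("cisco ios", "cisco_ios"), ("ios", "cisco_ios"), ("catalyst", "cisco_ios"),
   ("ws-c", "cisco_ios"), ("c9", "cisco_ios"), ("ios xr", "cisco_xr"),
   ("asr9k", "cisco_xr"), ("nx-os", "cisco_nxos"), ("nexus", "cisco_nxos"),
   ("n9k", "cisco_nxos"), ("n7k", "cisco_nxos"), ("n5k", "cisco_nxos"),
   ("n3k", "cisco_nxos"), ("adaptive security appliance", "cisco_asa"),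
   ("asa", "cisco_asa"), ("wireless lan controller", "cisco_wlc"),
   ("wireless", "cisco_wlc"), ("air-ct", "cisco_wlc"), ("wlc", "cisco_wlc")]

-- ===== PORT A =====
-- the 'for marker, device_type in …: if marker in blob: return device_type' loop with its default
def pvFindMarker (blob : String) : List (String × String) → String
  | [] => "cisco_ios"
  | (marker, device_type) :: rest =>
      if PySem.Str.isIn marker blob then device_type else pvFindMarker blob rest

def detect_device_type_from_platform (platform : Option String) : String :=
  let blob := PySem.Str.lower (PySem.Str.join "" [" ", platform.getD "", " "])
  pvFindMarker blob (PySem.List.sorted pvMap (fun item => PySem.Str.len item.1) true)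

-- ===== PORT B =====
def detect_device_type_from_platform_alt (platform : Option String) : String :=
  let blob := PySem.Str.lower (PySem.Str.join "" [" ", platform.getD "", " "])
  let st := pvMap.foldl
    (fun (st : Option String × Int) p =>
      if PySem.Str.isIn p.1 blob && decide (PySem.Str.len p.1 > st.2)
      then (some p.2, PySem.Str.len p.1) else st)
    (none, -1)
  match st.1 with
  | some t => t
  | none => "cisco_ios"

-- ===== PRECONDITION & SPEC =====
def Spec_detect_device_type_from_platform (platform : Option String) (out : String) : Prop := out = detect_device_type_from_platform_alt platform
instance (platform : Option String) (out : String) : Decidable (Spec_detect_device_type_from_platform platform out) := by unfold Spec_detect_device_type_from_platform; infer_instance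

-- ===== CLAIM (what is proved, stated in full; the proofs are below) =====
def Claim_equal_detect_device_type_from_platform : Prop := ∀ (platform : Option String), Dom_detect_device_type_from_platform platform → Spec_detect_device_type_from_platform platform (detect_device_type_from_platform platform)

-- ===== LEMMAS AND PROOFS =====

-- descending insertion used by sorted(…, reverse=True)
def pvIns {α : Type} (k : α → Int) (x : α) (acc : List α) : List α :=
  PySem.List.insertBy (fun a b => decide (k b < k a)) x acc

theorem pvIns_nil {α : Type} (k : α → Int) (x : α) : pvIns k x [] = [x] := rfl

theorem pvIns_cons {α : Type} (k : α → Int) (x y : α) (t : List α) :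
    pvIns k x (y :: t) = if k y < k x then x :: y :: t else y :: pvIns k x t := by
  simp [pvIns, PySem.List.insertBy]

theorem pvFind?_ins_of_neg {α : Type} (Q : α → Bool) (k : α → Int) (x : α)
    (hx : Q x = false) : ∀ acc : List α, (pvIns k x acc).find? Q = acc.find? Q := by
  intro acc
  induction acc with
  | nil => simp [pvIns_nil, List.find?, hx]
  | cons y t ih =>
      rw [pvIns_cons]
      by_cases h : k y < k x
      · rw [if_pos h, List.find?_cons_of_neg (by simp [hx])]
      · rw [if_neg h]
        cases hy : Q y
        · rw [List.find?_cons_of_neg (by simp [hy]), List.find?_cons_of_neg (by simp [hy]), ih]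
        · rw [List.find?_cons_of_pos (by simp [hy]), List.find?_cons_of_pos (by simp [hy])]

theorem pvFind?_ins_of_none {α : Type} (Q : α → Bool) (k : α → Int) (x : α)
    (hx : Q x = true) : ∀ acc : List α, acc.find? Q = none →
    (pvIns k x acc).find? Q = some x := by
  intro acc
  induction acc with
  | nil => simp [pvIns_nil, List.find?, hx]
  | cons y t ih =>
      intro hnone
      have hy : Q y = false := by
        cases hy : Q y
        · rfl
        · rw [List.find?_cons_of_pos (by simp [hy])] at hnone; cases hnone
      rw [List.find?_cons_of_neg (by simp [hy])] at hnone
      rw [pvIns_cons]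
      by_cases h : k y < k x
      · rw [if_pos h, List.find?_cons_of_pos (by simp [hx])]
      · rw [if_neg h, List.find?_cons_of_neg (by simp [hy]), ih hnone]

theorem pvFind?_ins_of_gt {α : Type} (Q : α → Bool) (k : α → Int) (x : α) (m : α)
    (hx : Q x = true) : ∀ acc : List α, acc.find? Q = some m → k m < k x →
    (pvIns k x acc).find? Q = some x := by
  intro acc
  induction acc generalizing m with
  | nil => intro hm _; simp [List.find?] at hm
  | cons y t ih =>
      intro hm hlt
      rw [pvIns_cons]
      by_cases h : k y < k x
      · rw [if_pos h, List.find?_cons_of_pos (by simp [hx])]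
      · rw [if_neg h]
        cases hy : Q y
        · rw [List.find?_cons_of_neg (by simp [hy])] at hm
          rw [List.find?_cons_of_neg (by simp [hy]), ih m hm hlt]
        · rw [List.find?_cons_of_pos (by simp [hy])] at hm
          have he : y = m := by injection hm
          subst he
          exact absurd hlt h

theorem pvFind?_ins_of_le {α : Type} (Q : α → Bool) (k : α → Int) (x : α) (m : α) :
    ∀ acc : List α,
    acc.Pairwise (fun a b => k b ≤ k a) → acc.find? Q = some m → k x ≤ k m →
    (pvIns k x acc).find? Q = some m := by
  intro acc
  induction acc generalizing m with
  | nil => intro _ hm _; simp [List.find?] at hm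
  | cons y t ih =>
      intro hpw hm hle
      rcases List.pairwise_cons.mp hpw with ⟨hy_ge, hpt⟩
      rw [pvIns_cons]
      by_cases h : k y < k x
      · -- impossible: the first match m has key ≥ k x > k y yet sits in y :: t
        exfalso
        cases hy : Q y
        · rw [List.find?_cons_of_neg (by simp [hy])] at hm
          have hmem := List.mem_of_find?_eq_some hm
          have := hy_ge m hmem
          omega
        · rw [List.find?_cons_of_pos (by simp [hy])] at hm
          have he : y = m := by injection hm
          subst he; omega
      · rw [if_neg h]
        cases hy : Q y
        · rw [List.find?_cons_of_neg (by simp [hy])] at hm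
          rw [List.find?_cons_of_neg (by simp [hy]), ih m hpt hm hle]
        · rw [List.find?_cons_of_pos (by simp [hy])] at hm
          rw [List.find?_cons_of_pos (by simp [hy]), hm]

theorem pvMem_ins {α : Type} (k : α → Int) (x z : α) (acc : List α)
    (hz : z ∈ pvIns k x acc) : z = x ∨ z ∈ acc := by
  induction acc with
  | nil =>
      rw [pvIns_nil] at hz
      exact Or.inl (List.mem_singleton.mp hz)
  | cons y t ih =>
      rw [pvIns_cons] at hz
      by_cases h : k y < k x
      · rw [if_pos h] at hz
        rcases List.mem_cons.mp hz with rfl | hz'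
        · exact Or.inl rfl
        · exact Or.inr hz'
      · rw [if_neg h] at hz
        rcases List.mem_cons.mp hz with rfl | hz'
        · exact Or.inr List.mem_cons_self
        · rcases ih hz' with rfl | hz''
          · exact Or.inl rfl
          · exact Or.inr (List.mem_cons_of_mem y hz'')

theorem pvPairwise_ins {α : Type} (k : α → Int) (x : α) :
    ∀ acc : List α, acc.Pairwise (fun a b => k b ≤ k a) →
    (pvIns k x acc).Pairwise (fun a b => k b ≤ k a) := by
  intro acc
  induction acc with
  | nil => intro _; rw [pvIns_nil]; simp
  | cons y t ih =>
      intro hpw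
      rcases List.pairwise_cons.mp hpw with ⟨hy_ge, hpt⟩
      rw [pvIns_cons]
      by_cases h : k y < k x
      · rw [if_pos h]
        refine List.pairwise_cons.mpr ⟨?_, hpw⟩
        intro z hz
        rcases List.mem_cons.mp hz with rfl | hz'
        · omega
        · have := hy_ge z hz'; omega
      · rw [if_neg h]
        refine List.pairwise_cons.mpr ⟨?_, ih hpt⟩
        intro z hz
        rcases pvMem_ins k x z t hz with rfl | hz'
        · omega
        · exact hy_ge z hz'

-- the invariant tying B's scan state to the first match of the sorted prefix
def pvInv {α : Type} (Q : α → Bool) (k : α → Int) (v : α → String)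
    (acc : List α) (st : Option String × Int) : Prop :=
  match acc.find? Q with
  | none => st = (none, -1)
  | some m => st.1 = some (v m) ∧ st.2 = k m ∧ ∀ p ∈ acc, Q p = true → k p ≤ k m

theorem pvMain {α : Type} (Q : α → Bool) (k : α → Int) (v : α → String)
    (hk : ∀ p : α, 0 ≤ k p) :
    ∀ (rest acc : List α) (st : Option String × Int),
    acc.Pairwise (fun a b => k b ≤ k a) → pvInv Q k v acc st →
    pvInv Q k v (rest.foldl (fun a x => pvIns k x a) acc)
      (rest.foldl (fun st x => if Q x && decide (k x > st.2) then (some (v x), k x) else st) st) := by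
  intro rest
  induction rest with
  | nil => intro acc st _ hinv; simpa using hinv
  | cons x rs ih =>
      intro acc st hpw hinv
      simp only [List.foldl_cons]
      refine ih (pvIns k x acc) _ (pvPairwise_ins k x acc hpw) ?_
      cases hx : Q x
      · -- x does not match: state and first match both unchanged
        rw [if_neg (by simp)]
        unfold pvInv at hinv ⊢
        rw [pvFind?_ins_of_neg Q k x hx acc]
        cases hfind : acc.find? Q with
        | none => rw [hfind] at hinv; exact hinv
        | some m =>
            rw [hfind] at hinv
            refine ⟨hinv.1, hinv.2.1, ?_⟩
            intro p hp hQp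
            rcases pvMem_ins k x p acc hp with rfl | hp'
            · rw [hQp] at hx; cases hx
            · exact hinv.2.2 p hp' hQp
      · unfold pvInv at hinv
        cases hfind : acc.find? Q with
        | none =>
            rw [hfind] at hinv
            rw [hinv]
            rw [if_pos (by have := hk x; simp; omega)]
            unfold pvInv
            rw [pvFind?_ins_of_none Q k x hx acc hfind]
            refine ⟨rfl, rfl, ?_⟩
            intro p hp hQp
            rcases pvMem_ins k x p acc hp with rfl | hp'
            · omega
            · exact absurd hQp (by simpa using List.find?_eq_none.mp hfind p hp')
        | some m =>
            rw [hfind] at hinv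
            obtain ⟨h1, h2, h3⟩ := hinv
            by_cases hlt : k m < k x
            · rw [if_pos (by rw [h2]; simp; omega)]
              unfold pvInv
              rw [pvFind?_ins_of_gt Q k x m hx acc hfind hlt]
              refine ⟨rfl, rfl, ?_⟩
              intro p hp hQp
              rcases pvMem_ins k x p acc hp with rfl | hp'
              · omega
              · have := h3 p hp' hQp; omega
            · rw [if_neg (by rw [h2]; simp; omega)]
              unfold pvInv
              rw [pvFind?_ins_of_le Q k x m acc hpw hfind (by omega)]
              refine ⟨h1, h2, ?_⟩
              intro p hp hQp
              rcases pvMem_ins k x p acc hp with rfl | hp'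
              · omega
              · exact h3 p hp' hQp

theorem pvFindMarker_of_none (blob : String) :
    ∀ S : List (String × String),
    S.find? (fun p => PySem.Str.isIn p.1 blob) = none → pvFindMarker blob S = "cisco_ios" := by
  intro S
  induction S with
  | nil => intro _; rfl
  | cons y t ih =>
      intro h
      obtain ⟨m, d⟩ := y
      cases hy : PySem.Str.isIn m blob
      · rw [List.find?_cons_of_neg (by simpa using hy)] at h
        simp only [pvFindMarker]
        rw [hy, if_neg (by simp)]
        exact ih h
      · rw [List.find?_cons_of_pos (by simpa using hy)] at h
        cases h

theorem pvFindMarker_of_some (blob : String) :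
    ∀ (S : List (String × String)) (w : String × String),
    S.find? (fun p => PySem.Str.isIn p.1 blob) = some w → pvFindMarker blob S = w.2 := by
  intro S
  induction S with
  | nil => intro w h; cases h
  | cons y t ih =>
      intro w h
      obtain ⟨m, d⟩ := y
      cases hy : PySem.Str.isIn m blob
      · rw [List.find?_cons_of_neg (by simpa using hy)] at h
        simp only [pvFindMarker]
        rw [hy, if_neg (by simp)]
        exact ih w h
      · rw [List.find?_cons_of_pos (by simpa using hy)] at h
        have he : (m, d) = w := by injection h
        subst he
        simp only [pvFindMarker]
        rw [hy, if_pos rfl]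

theorem pvLen_nonneg (s : String) : 0 ≤ PySem.Str.len s := by
  have h : PySem.Str.len s = (s.toList.length : Int) := by
    simp [PySem.Str.len_eq]
  rw [h]
  positivity

-- assembly over an arbitrary marker list: first match of the desc-sort = best-tracking scan
theorem pvCombined (blob : String) (L : List (String × String)) :
    pvFindMarker blob (PySem.List.sorted L (fun item => PySem.Str.len item.1) true) =
    match (L.foldl
        (fun (st : Option String × Int) p =>
          if PySem.Str.isIn p.1 blob && decide (PySem.Str.len p.1 > st.2)
          then (some p.2, PySem.Str.len p.1) else st)
        (none, -1)).1 with
    | some t => t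
    | none => "cisco_ios" := by
  have hsorted : PySem.List.sorted L (fun item => PySem.Str.len item.1) true =
      L.foldl (fun a x => pvIns (fun p : String × String => PySem.Str.len p.1) x a) [] := by
    rw [PySem.List.sorted_rev_eq_foldl_insertBy]
    simp only [pvIns]
  have hmain := pvMain (fun p : String × String => PySem.Str.isIn p.1 blob)
      (fun p => PySem.Str.len p.1) (fun p => p.2) (fun p => pvLen_nonneg p.1)
      L [] (none, -1) (by simp) (by unfold pvInv; simp [List.find?])
  unfold pvInv at hmain
  rw [hsorted]
  cases hfind : (L.foldl (fun a x => pvIns (fun p : String × String => PySem.Str.len p.1) x a) []).find?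
      (fun p => PySem.Str.isIn p.1 blob) with
  | none =>
      rw [hfind] at hmain
      rw [pvFindMarker_of_none blob _ hfind, hmain]
  | some m =>
      rw [hfind] at hmain
      rw [pvFindMarker_of_some blob _ m hfind, hmain.1]

-- ===== VERDICT (by name: the statement is the Claim_ definition above) =====
theorem detect_device_type_from_platform_spec : Claim_equal_detect_device_type_from_platform := by
  intro platform _
  unfold Spec_detect_device_type_from_platform
  unfold detect_device_type_from_platform detect_device_type_from_platform_alt
  set blob := PySem.Str.lower (PySem.Str.join "" [" ", platform.getD "", " "]) with hblob
  rw [pvCombined blob pvMap]
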